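-- pv_equiv track=rewrite | github.com/klark142/Introduction_to_Computer_Science | Zestaw_4/zad2.py | solve
-- ===== SOURCE A (Python) =====
-- def only_odd(num):
--     while num > 0:
--         last = num % 10
--         if last % 2 == 0:
--             return False
--         num //= 10
--     return True
--
-- def solve(t2):
--     row = 0
--     col = 0
--     while col < len(t2):
--         if only_odd(t2[row][col]):
--             row += 1
--             col = 0
--         else:
--             col += 1
--         if col == len(t2):
--             return False
--         if row == len(t2):
--             return True
-- ===== SOURCE B (Python) =====
-- def only_odd(num):
--     while num > 0:
--         last = num % 10
--         if last % 2 == 0: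
--             return False
--         num //= 10
--     return True
--
-- def solve(t2):
--     n = len(t2)
--     pending = list(range(n))
--     for j in range(n):
--         pending = [i for i in pending if not only_odd(t2[i][j])]
--         if not pending:
--             return True
--     return False
-- ===== Notes on version B (the rewrite author's own statement) =====
-- stated objective: alternative
-- what changed: Replaces A's row-major two-index cursor state machine by a column-major elimination scan: a worklist of still-unsatisfied row indices is filtered column by column, returning True as soon as the worklist empties; only_odd is kept verbatim.
-- outside the precondition, e.g. on solve([]): A returns None, B returns False; on solve([[2, 4], [2]]): A returns False, B raises IndexError
import Mathlib
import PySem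

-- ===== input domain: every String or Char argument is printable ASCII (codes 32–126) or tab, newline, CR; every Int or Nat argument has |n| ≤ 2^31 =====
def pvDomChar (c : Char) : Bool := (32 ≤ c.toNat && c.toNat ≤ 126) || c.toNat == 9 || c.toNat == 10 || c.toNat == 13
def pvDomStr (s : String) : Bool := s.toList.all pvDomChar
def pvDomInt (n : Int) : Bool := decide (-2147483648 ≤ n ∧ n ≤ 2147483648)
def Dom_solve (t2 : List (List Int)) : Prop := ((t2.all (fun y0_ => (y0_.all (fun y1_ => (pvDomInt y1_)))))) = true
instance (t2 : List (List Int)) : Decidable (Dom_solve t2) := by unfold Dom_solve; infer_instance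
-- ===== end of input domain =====

-- B replaces A's row-major two-index cursor state machine by a column-major elimination scan
-- over a worklist of still-unsatisfied row indices (objective: alternative); only_odd kept verbatim.


-- ===== PORT A =====
-- only_odd: shared helper; Source B contains the verbatim same function, so both ports use it.
def onlyOdd (num : Int) : Bool :=
  if _h : num > 0 then
    let last := PySem.Int.mod num 10
    if PySem.Int.mod last 2 == 0 then false
    else onlyOdd (PySem.Int.floordiv num 10)
  else true
termination_by num.toNat
decreasing_by
  simp
  omega

-- the while loop of A, state (row, col); `none` from indexing = IndexError (outside Pre_);
-- the `row ≤ len` guard only makes the recursion total (unreachable otherwise: row starts at 0)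
def solveLoop (t2 : List (List Int)) (row col : Nat) : Bool :=
  if _hc : col < t2.length then
    if _hr : row ≤ t2.length then
      match (PySem.List.pyGet? t2 (row : Int)).bind
            (fun r => PySem.List.pyGet? r (col : Int)) with
      | none => false
      | some v =>
        if onlyOdd v then
          if 0 = t2.length then false
          else if row + 1 = t2.length then true
          else solveLoop t2 (row + 1) 0
        else
          if col + 1 = t2.length then false
          else if row = t2.length then true
          else solveLoop t2 row (col + 1)
    else false
  else false     -- loop falls through: Python returns None (only reachable with t2 = []; outside Pre_)
termination_by (t2.length + 1 - row, t2.length - col)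
decreasing_by
  · exact Prod.Lex.left _ _ (by omega)
  · exact Prod.Lex.right _ (by omega)

def solve (t2 : List (List Int)) : Bool := solveLoop t2 0 0

-- ===== PORT B =====
-- one column step of Source B: pending = [i for i in pending if not only_odd(t2[i][j])]
-- (lookup `none` = IndexError in Python, outside Pre_; the port keeps the index there)
def solveAltFilter (t2 : List (List Int)) (j : Nat) (pending : List Nat) : List Nat :=
  pending.filter (fun i =>
    match (PySem.List.pyGet? t2 (i : Int)).bind
          (fun r => PySem.List.pyGet? r (j : Int)) with
    | none => true
    | some v => !onlyOdd v)

-- Source B's `for j in range(n)` loop over the remaining column indices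
def solveAltLoop (t2 : List (List Int)) (pending : List Nat) : List Nat → Bool
  | [] => false
  | j :: rest =>
    let p := solveAltFilter t2 j pending
    if p.isEmpty then true else solveAltLoop t2 p rest

def solve_alt (t2 : List (List Int)) : Bool :=
  let n := t2.length
  solveAltLoop t2 (List.range n) (List.range n)

-- ===== PRECONDITION & SPEC =====
-- property of an input number: nonpositive, or all decimal digits odd (stated via Nat.digits,
-- independently of the ports)
def allOddDigits (x : Int) : Bool :=
  decide (x ≤ 0) || (Nat.digits 10 x.toNat).all (fun d => d % 2 = 1)

-- Pre_ excludes the empty matrix, where A falls through the loop and returns None (not a bool),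
-- and matrices where some row shorter than len(t2) has no all-odd-digit (or nonpositive) entry:
-- on such inputs A raises IndexError when its scan reaches that row, or returns early without it
-- (while B's column scan reaches the short row and raises).
def Pre_solve (t2 : List (List Int)) : Prop :=
  t2 ≠ [] ∧ ∀ r ∈ t2, t2.length ≤ r.length ∨ ∃ x ∈ r, allOddDigits x = true
instance (t2 : List (List Int)) : Decidable (Pre_solve t2) := by unfold Pre_solve; infer_instance

def pvWitness_solve : List (List Int) := [[2, 13], [5, 4]]

def Spec_solve (t2 : List (List Int)) (out : Bool) : Prop := out = solve_alt t2
instance (t2 : List (List Int)) (out : Bool) : Decidable (Spec_solve t2 out) := by unfold Spec_solve; infer_instance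

-- ===== CLAIM (what is proved, stated in full; the proofs are below) =====
def Claim_equal_solve : Prop := ∀ (t2 : List (List Int)), Dom_solve t2 → Pre_solve t2 → Spec_solve t2 (solve t2)

-- ===== LEMMAS AND PROOFS =====

-- loop invariant for A: the loop at (row, col) decides "rest of current row (cols col..n-1) has an
-- all-odd entry, and every later row has one among its first n entries"; where Python would
-- raise IndexError both sides of the equation are false, so no length hypothesis is needed
set_option maxRecDepth 4096 in
theorem solveLoop_eq (t2 : List (List Int))
    (row col : Nat) (hrow : row < t2.length) (hcol : col < t2.length) :
    solveLoop t2 row col =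
      ((((t2.getD row []).drop col).take (t2.length - col)).any onlyOdd
        && (t2.drop (row + 1)).all (fun r => (r.take t2.length).any onlyOdd)) := by
  rw [solveLoop]
  have hrget : t2[row]? = some t2[row] := List.getElem?_eq_getElem hrow
  by_cases hcoll : col < t2[row].length
  case neg =>
    have hget : (PySem.List.pyGet? t2 (row : Int)).bind
        (fun r => PySem.List.pyGet? r (col : Int)) = none := by
      simp [PySem.List.pyGet?_natCast, hrget, List.getElem?_eq_none (by omega : t2[row].length ≤ col)]
    have hnil : (t2.getD row []).drop col = [] := by
      rw [List.getD_eq_getElem t2 [] hrow]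
      exact List.drop_eq_nil_of_le (by omega)
    simp only [dif_pos hcol, dif_pos (le_of_lt hrow), hget, hnil]
    simp
  case pos =>
  have hget : (PySem.List.pyGet? t2 (row : Int)).bind
      (fun r => PySem.List.pyGet? r (col : Int)) = some (t2[row][col]) := by
    simp [PySem.List.pyGet?_natCast, hrget, List.getElem?_eq_getElem hcoll]
  have hdrop : ((t2.getD row []).drop col).take (t2.length - col)
      = t2[row][col] :: ((t2[row].drop (col + 1)).take (t2.length - (col + 1))) := by
    rw [List.getD_eq_getElem t2 [] hrow, ← List.getElem_cons_drop hcoll]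
    have : t2.length - col = (t2.length - (col + 1)) + 1 := by omega
    rw [this, List.take_succ_cons]
  simp only [dif_pos hcol, dif_pos (le_of_lt hrow), hget]
  by_cases hv : onlyOdd (t2[row][col])
  · rw [if_pos hv, if_neg (by omega : ¬ (0 = t2.length))]
    have hhead : (((t2.getD row []).drop col).take (t2.length - col)).any onlyOdd = true := by
      rw [hdrop]; simp [hv]
    by_cases hlast : row + 1 = t2.length
    · rw [if_pos hlast, hhead, hlast, List.drop_length, List.all_nil, Bool.and_true]
    · have hrow1 : row + 1 < t2.length := by omega
      rw [if_neg hlast, solveLoop_eq t2 (row + 1) 0 hrow1 (by omega), hhead]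
      have : t2.drop (row + 1) = t2[row + 1] :: t2.drop (row + 2) :=
        (List.getElem_cons_drop hrow1).symm
      rw [this, List.all_cons, Bool.true_and,
        List.getD_eq_getElem t2 [] hrow1, List.drop_zero, Nat.sub_zero]
  · rw [if_neg (by simp [hv])]
    by_cases hlast : col + 1 = t2.length
    · rw [if_pos hlast, hdrop]
      simp [hv, hlast]
    · have hcol1 : col + 1 < t2.length := by omega
      rw [if_neg hlast, if_neg (by omega : ¬ (row = t2.length)),
        solveLoop_eq t2 row (col + 1) hrow hcol1, hdrop]
      have : t2[row].drop (col + 1) = (t2.getD row []).drop (col + 1) := by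
        rw [List.getD_eq_getElem t2 [] hrow]
      simp [hv, this]
termination_by (t2.length + 1 - row, t2.length - col)
decreasing_by
  all_goals first
    | exact Prod.Lex.right _ (by omega)
    | exact Prod.Lex.left _ _ (by omega)

-- onlyOdd on a Nat computes exactly "all decimal digits odd"
theorem onlyOdd_natCast (m : Nat) :
    onlyOdd (m : Int) = (Nat.digits 10 m).all (fun d => decide (d % 2 = 1)) := by
  rw [onlyOdd]
  by_cases h : (0 : Int) < (m : Int)
  · rw [dif_pos h]
    have hm : 0 < m := by omega
    rw [Nat.digits_def' (by norm_num : (1:Nat) < 10) hm, List.all_cons]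
    have hmod : PySem.Int.mod (m : Int) (10 : Int) = ((m % 10 : Nat) : Int) := by
      exact_mod_cast PySem.Int.mod_natCast m 10
    have hmod2 : PySem.Int.mod ((m % 10 : Nat) : Int) (2 : Int) = ((m % 10 % 2 : Nat) : Int) := by
      exact_mod_cast PySem.Int.mod_natCast (m % 10) 2
    have hdiv : PySem.Int.floordiv (m : Int) (10 : Int) = ((m / 10 : Nat) : Int) := by
      exact_mod_cast PySem.Int.floordiv_natCast m 10
    simp only [hmod, hmod2, hdiv]
    rw [onlyOdd_natCast (m / 10)]
    by_cases he : m % 10 % 2 = 0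
    · simp [he]
    · have h1 : m % 10 % 2 = 1 := by omega
      simp [h1]
  · rw [dif_neg h]
    have : m = 0 := by omega
    subst this
    simp
termination_by m
decreasing_by exact Nat.div_lt_self (by omega) (by norm_num)

theorem allOdd_imp_onlyOdd (x : Int) (h : allOddDigits x = true) : onlyOdd x = true := by
  by_cases hx : 0 < x
  · have hx' : x = ((x.toNat : Nat) : Int) := by omega
    rw [hx', onlyOdd_natCast]
    rw [allOddDigits] at h
    simpa [show ¬ (x ≤ 0) by omega] using h
  · rw [onlyOdd, dif_neg hx]

-- invariant for B's column loop: if no pending row has an all-odd entry among its first j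
-- columns, the remaining loop decides "every pending row has one among its first n entries"
theorem solveAltLoop_eq (t2 : List (List Int)) (hpre : Pre_solve t2)
    (j : Nat) (pending : List Nat) (hj : j ≤ t2.length) (hne : pending ≠ [])
    (hmem : ∀ i ∈ pending, i < t2.length)
    (hinv : ∀ i ∈ pending, ∀ k, k < j → ∀ _ : k < (t2.getD i []).length,
        onlyOdd ((t2.getD i []).getD k 0) = false) :
    solveAltLoop t2 pending (List.range' j (t2.length - j)) =
      decide (∀ i ∈ pending, ((t2.getD i []).take t2.length).any onlyOdd = true) := by
  by_cases hjn : j = t2.length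
  · -- no columns left: the loop returns False, and indeed no pending row can be good
    subst hjn
    rw [Nat.sub_self]
    simp only [List.range'_zero, solveAltLoop]
    rcases List.exists_mem_of_ne_nil pending hne with ⟨i, hi⟩
    have hbad : ¬ (∀ i ∈ pending, ((t2.getD i []).take t2.length).any onlyOdd = true) := by
      intro hall
      rcases List.any_eq_true.mp (hall i hi) with ⟨x, hx, hox⟩
      rcases List.mem_take_iff_getElem.mp hx with ⟨k, hk, hxeq⟩
      have hklen : k < (t2.getD i []).length := by omega
      have := hinv i hi k (by omega) hklen
      rw [List.getD_eq_getElem _ _ hklen, hxeq] at this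
      rw [this] at hox
      exact absurd hox (by simp)
    exact (decide_eq_false hbad).symm
  · -- one more column j
    have hjlt : j < t2.length := by omega
    have hcons : List.range' j (t2.length - j) = j :: List.range' (j + 1) (t2.length - (j + 1)) := by
      have h1 : t2.length - j = (t2.length - (j + 1)) + 1 := by omega
      rw [h1, List.range'_succ]
    rw [hcons, solveAltLoop]
    -- inside Pre_ every lookup at column j succeeds
    have hjr : ∀ i ∈ pending, j < (t2.getD i []).length := by
      intro i hi
      have hilen := hmem i hi
      rw [List.getD_eq_getElem t2 [] hilen]
      rcases hpre.2 t2[i] (List.getElem_mem hilen) with hlong | ⟨x, hx, hox⟩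
      · omega
      · by_contra hnot
        rcases List.mem_iff_getElem.mp hx with ⟨k, hk, hxeq⟩
        have := hinv i hi k (by omega) (by rw [List.getD_eq_getElem t2 [] hilen]; exact hk)
        rw [List.getD_eq_getElem t2 [] hilen, List.getD_eq_getElem _ _ hk, hxeq,
          allOdd_imp_onlyOdd x hox] at this
        exact absurd this (by simp)
    have hfil : solveAltFilter t2 j pending
        = pending.filter (fun i => !onlyOdd ((t2.getD i []).getD j 0)) := by
      unfold solveAltFilter
      apply List.filter_congr
      intro i hi
      have hilen := hmem i hi
      have hjri := hjr i hi
      rw [List.getD_eq_getElem t2 [] hilen] at hjri ⊢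
      simp [PySem.List.pyGet?_natCast, List.getElem?_eq_getElem hilen,
        List.getElem?_eq_getElem hjri]
    -- a row with an all-odd entry at column j is good
    have hgoodj : ∀ i ∈ pending, onlyOdd ((t2.getD i []).getD j 0) = true →
        ((t2.getD i []).take t2.length).any onlyOdd = true := by
      intro i hi ho
      have hjri := hjr i hi
      apply List.any_eq_true.mpr
      refine ⟨(t2.getD i []).getD j 0, ?_, ho⟩
      rw [List.getD_eq_getElem _ _ hjri]
      exact List.mem_take_iff_getElem.mpr ⟨j, by omega, rfl⟩
    by_cases hp : (solveAltFilter t2 j pending).isEmpty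
    · rw [if_pos hp]
      rw [hfil, List.isEmpty_iff, List.filter_eq_nil_iff] at hp
      have hall : ∀ i ∈ pending, ((t2.getD i []).take t2.length).any onlyOdd = true := by
        intro i hi
        have := hp i hi
        exact hgoodj i hi (by simpa using this)
      exact (decide_eq_true hall).symm
    · rw [if_neg hp]
      have hpne : solveAltFilter t2 j pending ≠ [] := by
        simpa [List.isEmpty_iff] using hp
      rw [solveAltLoop_eq t2 hpre (j + 1) (solveAltFilter t2 j pending) (by omega) hpne
        (by intro i hi; rw [hfil] at hi; exact hmem i (List.mem_filter.mp hi).1)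
        (by
          intro i hi k hk hklen
          rw [hfil] at hi
          rcases List.mem_filter.mp hi with ⟨hip, hkept⟩
          rcases Nat.lt_succ_iff_lt_or_eq.mp hk with hlt | rfl
          · exact hinv i hip k hlt hklen
          · simpa using hkept)]
      -- rows removed at column j are good, so the quantifier over the filter equals the one over pending
      have hiff : (∀ i ∈ solveAltFilter t2 j pending,
            ((t2.getD i []).take t2.length).any onlyOdd = true)
          ↔ (∀ i ∈ pending, ((t2.getD i []).take t2.length).any onlyOdd = true) := by
        constructor
        · intro hf i hi
          by_cases ho : onlyOdd ((t2.getD i []).getD j 0)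
          · exact hgoodj i hi ho
          · apply hf
            rw [hfil]
            have hfalse : onlyOdd ((t2.getD i []).getD j 0) = false :=
              Bool.eq_false_iff.mpr ho
            exact List.mem_filter.mpr ⟨hi, by rw [hfalse]; rfl⟩
        · intro hall i hi
          rw [hfil] at hi
          exact hall i (List.mem_filter.mp hi).1
      simp only [hiff]
termination_by t2.length - j
decreasing_by omega

-- ===== VERDICT (by name: the statement is the Claim_ definition above) =====
theorem solve_spec : Claim_equal_solve := by
  intro t2 _ hpre
  have hne := hpre.1
  have hpos : 0 < t2.length := List.length_pos_iff.mpr hne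
  unfold Spec_solve solve
  show solveLoop t2 0 0 = solveAltLoop t2 (List.range t2.length) (List.range t2.length)
  rw [solveLoop_eq t2 0 0 hpos hpos]
  rw [List.range_eq_range']
  have halt := solveAltLoop_eq t2 hpre 0 (List.range' 0 t2.length) (by omega)
    (by simp [List.range'_eq_nil_iff]; omega)
    (by intro i hi; simpa using (List.mem_range'_1.mp hi).2)
    (by intro i _ k hk _; omega)
  rw [Nat.sub_zero] at halt
  rw [halt]
  -- both sides are "every row of t2 has an all-odd entry among its first n"
  apply Bool.coe_iff_coe.mp
  simp only [Bool.and_eq_true, List.any_eq_true, List.all_eq_true, decide_eq_true_eq,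
    List.mem_range'_1]
  constructor
  · rintro ⟨⟨x, hx, hox⟩, hrest⟩ i ⟨-, hi⟩
    simp only [Nat.zero_add] at hi
    rcases Nat.eq_zero_or_pos i with rfl | hip
    · refine ⟨x, ?_, hox⟩
      simpa [Nat.sub_zero, List.drop_zero] using hx
    · have : t2.getD i [] ∈ t2.drop 1 := by
        rw [List.getD_eq_getElem t2 [] hi]
        have : t2[i] = (t2.drop 1)[i-1]'(by simp; omega) := by
          rw [List.getElem_drop]; congr 1; omega
        rw [this]
        exact List.getElem_mem _
      exact hrest _ this
  · intro hall
    constructor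
    · have := hall 0 ⟨Nat.le_refl 0, by omega⟩
      simpa [Nat.sub_zero, List.drop_zero] using this
    · intro r hr
      rcases List.mem_iff_getElem.mp hr with ⟨k, hk, hkeq⟩
      have hk' : 1 + k < t2.length := by simp at hk; omega
      have := hall (1 + k) ⟨by omega, by omega⟩
      rw [List.getD_eq_getElem t2 [] hk'] at this
      have heq : t2[1 + k] = r := by
        rw [← hkeq, List.getElem_drop]
      rw [heq] at this
      exact this
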